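-- pv_equiv track=rewrite | github.com/AbhiVishu/My-Python-Projects | tempPy.py | frequency
-- ===== SOURCE A (Python) =====
-- from collections import Counter
--
-- def frequency(l):
--     count =0
--     count1 =0
--     l.sort()
--     #print (l)
--     set1 = set(l)
--     #print (set1)
--     element = []
--     element.extend(set1)
--     element.sort()
--     #print (element)
--     c = Counter(l)
--     s = [c[i] for i in range(min(c),max(c)+1)]
--     #print (s)
--     freqList = []
--     for i in s:
--         if(i != 0):
--             freqList.append(i)
--
--     #print (freqList)
--     minList = []
--     maxList = []
--     minimumFreq = min(freqList)
--     maximumFreq = max(freqList)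
--     if(minimumFreq == maximumFreq):
--         minList = maxList
--     for i in range(0, len(freqList)):
--         if(freqList[i] == minimumFreq):
--             minList.append(element[i])
--         elif(freqList[i] == maximumFreq):
--             maxList.append(element[i])
--
--     return (minList, maxList)
-- ===== SOURCE B (Python) =====
-- from collections import Counter
--
-- def frequency(l):
--     l.sort()
--     c = Counter(l)
--     groups = {}
--     for elem in sorted(c):
--         groups.setdefault(c[elem], []).append(elem)
--     minf = min(c.values())
--     maxf = max(c.values())
--     return (groups[minf], groups[maxf])
-- ===== Notes on version B (the rewrite author's own statement) =====
-- stated objective: faster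
-- what changed: Instead of materialising a count for every integer in range(min(l), max(l)+1) and filtering out zeros, B groups the sorted distinct elements by their frequency in one dict pass and looks up the min/max frequency groups; cost depends on the number of elements, not on the numeric spread.
import Mathlib
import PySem

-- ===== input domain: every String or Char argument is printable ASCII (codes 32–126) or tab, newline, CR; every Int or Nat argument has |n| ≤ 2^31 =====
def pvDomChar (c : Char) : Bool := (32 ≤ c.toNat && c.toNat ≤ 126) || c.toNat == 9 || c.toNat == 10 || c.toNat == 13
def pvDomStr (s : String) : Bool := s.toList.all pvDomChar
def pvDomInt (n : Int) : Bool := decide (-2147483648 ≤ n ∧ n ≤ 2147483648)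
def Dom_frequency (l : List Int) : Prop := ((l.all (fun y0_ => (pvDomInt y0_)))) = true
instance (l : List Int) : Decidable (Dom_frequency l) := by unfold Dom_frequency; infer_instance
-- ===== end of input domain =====

-- B replaces A's scan over the whole numeric range(min(l), max(l)+1) by one grouping pass over
-- the distinct elements keyed by frequency (measurably faster when the numeric spread is large).
-- Both Pythons sort l in place (same caller-visible mutation); the equivalence proved here is
-- about the RETURN value. A consumes set(l) only after sorting it, so the unmodelled set
-- iteration order cannot affect the result.

-- ===== PORT A =====
def frequency (l : List Int) : List Int × List Int :=
  let ls := PySem.List.sorted l (fun x => x) false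
  let set1 := PySem.Set.ofList ls
  let element := PySem.List.sorted (([] : List Int) ++ set1) (fun x => x) false
  let c := PySem.Dict.counter ls
  let s := (PySem.List.pyRange ((PySem.List.min? c.keys (fun x => x)).getD 0)
              ((PySem.List.max? c.keys (fun x => x)).getD 0 + 1) 1).map (fun i => c.getD i 0)
  let freqList := s.foldl (fun acc i => if i ≠ 0 then acc ++ [i] else acc) []
  let minimumFreq := (PySem.List.min? freqList (fun x => x)).getD 0
  let maximumFreq := (PySem.List.max? freqList (fun x => x)).getD 0
  if minimumFreq = maximumFreq then
    -- 'minList = maxList' aliases the two lists: every append lands in both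
    let shared := (PySem.List.pyRange 0 (PySem.List.len freqList) 1).foldl
      (fun acc i => if PySem.List.pyGetD freqList i 0 = minimumFreq then
          acc ++ [PySem.List.pyGetD element i 0] else acc) []
    (shared, shared)
  else
    (PySem.List.pyRange 0 (PySem.List.len freqList) 1).foldl
      (fun acc i =>
        if PySem.List.pyGetD freqList i 0 = minimumFreq then
          (acc.1 ++ [PySem.List.pyGetD element i 0], acc.2)
        else if PySem.List.pyGetD freqList i 0 = maximumFreq then
          (acc.1, acc.2 ++ [PySem.List.pyGetD element i 0])
        else acc) ([], [])

-- ===== PORT B =====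
def frequency_alt (l : List Int) : List Int × List Int :=
  let ls := PySem.List.sorted l (fun x => x) false
  let c := PySem.Dict.counter ls
  let groups := (PySem.List.sorted c.keys (fun x => x) false).foldl
    (fun g e => g.insert (c.getD e 0) (g.getD (c.getD e 0) ([] : List Int) ++ [e]))
    PySem.Dict.empty
  let minf := (PySem.List.min? c.values (fun x => x)).getD 0
  let maxf := (PySem.List.max? c.values (fun x => x)).getD 0
  (groups.getD minf [], groups.getD maxf [])

-- ===== PRECONDITION & SPEC =====
-- Pre_ excludes only the empty list, on which both Pythons raise ValueError (min() of an empty sequence).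
def Pre_frequency (l : List Int) : Prop := l ≠ []
instance (l : List Int) : Decidable (Pre_frequency l) := by unfold Pre_frequency; infer_instance
def pvWitness_frequency : List Int := [1, 2, 2, 5]
def Spec_frequency (l : List Int) (out : List Int × List Int) : Prop := out = frequency_alt l
instance (l : List Int) (out : List Int × List Int) : Decidable (Spec_frequency l out) := by unfold Spec_frequency; infer_instance

-- ===== CLAIM (what is proved, stated in full; the proofs are below) =====
def Claim_equal_frequency : Prop := ∀ (l : List Int), Dom_frequency l → Pre_frequency l → Spec_frequency l (frequency l)

-- ===== LEMMAS AND PROOFS =====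

lemma minD_perm (xs ys : List Int) (h : xs.Perm ys) :
    (PySem.List.min? xs (fun x => x)).getD 0 = (PySem.List.min? ys (fun x => x)).getD 0 := by
  rcases hx : PySem.List.min? xs (fun x => x) with _ | m
  · rw [PySem.List.min?_eq_none_iff] at hx
    subst hx
    rw [h.symm.eq_nil, Iff.mpr (PySem.List.min?_eq_none_iff _ _) rfl]
  · rcases hy : PySem.List.min? ys (fun x => x) with _ | m'
    · rw [PySem.List.min?_eq_none_iff] at hy; subst hy
      rw [h.eq_nil] at hx
      rw [Iff.mpr (PySem.List.min?_eq_none_iff _ _) rfl] at hx; cases hx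
    · simp only [Option.getD_some]
      have hm := PySem.List.min?_mem hx
      have hm' := PySem.List.min?_mem hy
      exact le_antisymm (PySem.List.min?_isMin hx m' (h.mem_iff.mpr hm'))
        (PySem.List.min?_isMin hy m (h.mem_iff.mp hm))

lemma maxD_perm (xs ys : List Int) (h : xs.Perm ys) :
    (PySem.List.max? xs (fun x => x)).getD 0 = (PySem.List.max? ys (fun x => x)).getD 0 := by
  rcases hx : PySem.List.max? xs (fun x => x) with _ | m
  · rw [PySem.List.max?_eq_none_iff] at hx
    subst hx
    rw [h.symm.eq_nil, Iff.mpr (PySem.List.max?_eq_none_iff _ _) rfl]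
  · rcases hy : PySem.List.max? ys (fun x => x) with _ | m'
    · rw [PySem.List.max?_eq_none_iff] at hy; subst hy
      rw [h.eq_nil] at hx
      rw [Iff.mpr (PySem.List.max?_eq_none_iff _ _) rfl] at hx; cases hx
    · simp only [Option.getD_some]
      have hm := PySem.List.max?_mem hx
      have hm' := PySem.List.max?_mem hy
      exact le_antisymm (PySem.List.max?_isMax hy m (h.mem_iff.mp hm))
        (PySem.List.max?_isMax hx m' (h.mem_iff.mpr hm'))

lemma filter_pyRange_eq (E : List Int) (a b : Int) (p : Int → Bool)
    (hE : E.Pairwise (· < ·)) (hp : ∀ x, p x = true ↔ x ∈ E)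
    (hbd : ∀ x ∈ E, a ≤ x ∧ x < b) :
    (PySem.List.pyRange a b 1).filter p = E := by
  have hnodup1 : ((PySem.List.pyRange a b 1).filter p).Nodup :=
    (PySem.List.nodup_pyRange_one a b).filter p
  have hnodup2 : E.Nodup := hE.imp (fun h => ne_of_lt h)
  have hmem : ∀ x, x ∈ (PySem.List.pyRange a b 1).filter p ↔ x ∈ E := by
    intro x
    rw [List.mem_filter, PySem.List.mem_pyRange_one, hp]
    exact ⟨fun h => h.2, fun h => ⟨hbd x h, h⟩⟩
  have hperm := (List.perm_ext_iff_of_nodup hnodup1 hnodup2).mpr hmem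
  exact hperm.eq_of_pairwise (fun _ _ _ _ h1 h2 => absurd h2 (not_lt.mpr h1.le))
    ((PySem.List.pairwise_lt_pyRange_one a b).filter p) hE

lemma idx_loop {β : Type} (E : List Int) (f : Int → Int) (g : β → Int → Int → β) (init : β) :
    (PySem.List.pyRange 0 (PySem.List.len (E.map f)) 1).foldl
      (fun acc i => g acc (PySem.List.pyGetD (E.map f) i 0) (PySem.List.pyGetD E i 0)) init
    = E.foldl (fun acc e => g acc (f e) e) init := by
  have hlen : PySem.List.len (E.map f) = (E.length : Int) := by
    simp [PySem.List.len_eq]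
  rw [hlen]
  have hcongr := PySem.List.foldl_congr_mem
    (l := PySem.List.pyRange 0 (E.length : Int) 1) (init := init)
    (f := fun acc i => g acc (PySem.List.pyGetD (E.map f) i 0) (PySem.List.pyGetD E i 0))
    (g := fun acc i => (fun acc e => g acc (f e) e) acc (PySem.List.pyGetD E i 0))
    (by
      intro acc i hi
      rw [PySem.List.mem_pyRange_one] at hi
      simp only []
      rw [PySem.List.pyGetD_eq_getElem (E.map f) 0 hi.1 (by simpa using hi.2),
        PySem.List.pyGetD_eq_getElem E 0 hi.1 (by simpa using hi.2)]
      simp)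
  rw [hcongr]
  exact PySem.List.foldl_pyRange_zero_pyGetD' E 0 (fun acc e => g acc (f e) e) init

lemma group_fold (E : List Int) (f : Int → Int) (v : Int) (g0 : PySem.Dict Int (List Int)) :
    (E.foldl (fun g e => g.insert (f e) (g.getD (f e) ([] : List Int) ++ [e])) g0).getD v []
    = g0.getD v [] ++ E.filter (fun e => decide (f e = v)) := by
  induction E generalizing g0 with
  | nil => simp
  | cons e E ih =>
    simp only [List.foldl_cons, List.filter_cons]
    rw [ih, PySem.Dict.getD_insert]
    by_cases h : f e = v
    · simp [h]
    · simp [h, Ne.symm h]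

lemma pair_loop (E : List Int) (f : Int → Int) (m M : Int) (hmM : m ≠ M)
    (acc : List Int × List Int) :
    E.foldl (fun acc e =>
        if f e = m then (acc.1 ++ [e], acc.2)
        else if f e = M then (acc.1, acc.2 ++ [e])
        else acc) acc
    = (acc.1 ++ E.filter (fun e => decide (f e = m)),
       acc.2 ++ E.filter (fun e => decide (f e = M))) := by
  induction E generalizing acc with
  | nil => simp
  | cons e E ih =>
    simp only [List.foldl_cons, List.filter_cons]
    by_cases h1 : f e = m
    · have h2 : ¬ f e = M := fun h => hmM (h1.symm.trans h)
      simp [h1, ih, hmM]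
    · by_cases h2 : f e = M
      · simp [h2, ih, Ne.symm hmM]
      · simp [h1, h2, ih]

-- ===== VERDICT (by name: the statement is the Claim_ definition above) =====
theorem frequency_spec : Claim_equal_frequency := by
  intro l _ hpre
  unfold Spec_frequency
  unfold frequency frequency_alt
  simp only []
  rw [List.nil_append, PySem.Dict.keys_counter]
  set ls := PySem.List.sorted l (fun x => x) false with hls
  set E := PySem.List.sorted (PySem.Set.ofList ls) (fun x => x) false with hE
  set f : Int → Int := fun e => (PySem.Dict.counter ls).getD e 0 with hf
  -- the sorted copy of l is nonempty, hence so is its set of distinct elements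
  have hlsne : ls ≠ [] := by
    rw [hls]
    simpa [PySem.List.sorted_eq_nil_iff] using hpre
  have hSne : PySem.Set.ofList ls ≠ [] := by
    intro h
    apply hlsne
    rw [List.eq_nil_iff_forall_not_mem]
    intro x hx
    have hx' : x ∈ PySem.Set.ofList ls := by
      simpa [PySem.Set.mem_ofList] using hx
    simp [h] at hx'
  obtain ⟨mk, hmk⟩ : ∃ m, PySem.List.min? (PySem.Set.ofList ls) (fun x => x) = some m := by
    rcases h : PySem.List.min? (PySem.Set.ofList ls) (fun x => x) with _ | m
    · rw [PySem.List.min?_eq_none_iff] at h; exact absurd h hSne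
    · exact ⟨m, rfl⟩
  obtain ⟨Mk, hMk⟩ : ∃ m, PySem.List.max? (PySem.Set.ofList ls) (fun x => x) = some m := by
    rcases h : PySem.List.max? (PySem.Set.ofList ls) (fun x => x) with _ | m
    · rw [PySem.List.max?_eq_none_iff] at h; exact absurd h hSne
    · exact ⟨m, rfl⟩
  -- A's freqList is the counts of the sorted distinct elements
  have hfreq : List.foldl (fun acc i => if i ≠ 0 then acc ++ [i] else acc) []
      (List.map (fun i => (PySem.Dict.counter ls).getD i 0)
        (PySem.List.pyRange ((PySem.List.min? (PySem.Set.ofList ls) fun x => x).getD 0)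
          ((PySem.List.max? (PySem.Set.ofList ls) fun x => x).getD 0 + 1) 1))
      = E.map f := by
    rw [PySem.List.foldl_append_ite_eq_filter, List.nil_append, List.filter_map]
    congr 1
    apply filter_pyRange_eq
    · rw [hE]; exact PySem.List.sorted_ofList_pairwise_lt ls
    · intro x
      simp [Function.comp, PySem.Dict.getD_counter, hE, PySem.List.mem_sorted,
        List.count_eq_zero, PySem.Set.mem_ofList]
    · intro x hx
      have hxS : x ∈ PySem.Set.ofList ls := by
        rw [hE, PySem.List.mem_sorted] at hx; exact hx
      rw [hmk, hMk]
      simp only [Option.getD_some]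
      exact ⟨PySem.List.min?_isMin hmk x hxS, by
        have := PySem.List.max?_isMax hMk x hxS; omega⟩
  rw [hfreq]
  -- min / max frequency agree between the two programs (values vs mapped counts)
  have hvals : (PySem.Dict.counter ls).values
      = (PySem.Set.ofList ls).map f := by
    rw [PySem.Dict.values_eq_map_keys _ (PySem.Dict.nodup_keys_counter ls) 0,
      PySem.Dict.keys_counter]
  have hperm : (E.map f).Perm ((PySem.Set.ofList ls).map f) :=
    (PySem.List.sorted_perm (PySem.Set.ofList ls) (fun x => x) false).map f
  have hminEq : (PySem.List.min? ((PySem.Set.ofList ls).map f) (fun x => x)).getD 0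
      = (PySem.List.min? (E.map f) (fun x => x)).getD 0 := minD_perm _ _ hperm.symm
  have hmaxEq : (PySem.List.max? ((PySem.Set.ofList ls).map f) (fun x => x)).getD 0
      = (PySem.List.max? (E.map f) (fun x => x)).getD 0 := maxD_perm _ _ hperm.symm
  rw [hvals, hminEq, hmaxEq]
  set minF := (PySem.List.min? (E.map f) (fun x => x)).getD 0 with hminF
  set maxF := (PySem.List.max? (E.map f) (fun x => x)).getD 0 with hmaxF
  -- B's groups: the group of v is the elements of E whose count is v
  have hgrp : ∀ v : Int, (List.foldl (fun g e =>
        g.insert ((PySem.Dict.counter ls).getD e 0)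
          (g.getD ((PySem.Dict.counter ls).getD e 0) [] ++ [e])) PySem.Dict.empty E).getD v []
      = E.filter (fun e => decide (f e = v)) := by
    intro v
    have h := group_fold E f v PySem.Dict.empty
    simpa [hf, PySem.Dict.getD_empty] using h
  rw [hgrp minF, hgrp maxF]
  by_cases hmm : minF = maxF
  · rw [if_pos hmm]
    have hsh : (PySem.List.pyRange 0 (PySem.List.len (E.map f)) 1).foldl
        (fun acc i => if PySem.List.pyGetD (E.map f) i 0 = minF then
            acc ++ [PySem.List.pyGetD E i 0] else acc) []
        = E.foldl (fun acc e => if f e = minF then acc ++ [e] else acc) [] :=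
      idx_loop E f (fun acc v e => if v = minF then acc ++ [e] else acc) []
    rw [hsh, PySem.List.foldl_append_ite_eq_filter, List.nil_append, ← hmm]
  · rw [if_neg hmm]
    have hpr : (PySem.List.pyRange 0 (PySem.List.len (E.map f)) 1).foldl
        (fun acc i =>
          if PySem.List.pyGetD (E.map f) i 0 = minF then
            (acc.1 ++ [PySem.List.pyGetD E i 0], acc.2)
          else if PySem.List.pyGetD (E.map f) i 0 = maxF then
            (acc.1, acc.2 ++ [PySem.List.pyGetD E i 0])
          else acc) ([], [])
        = E.foldl (fun acc e =>
            if f e = minF then (acc.1 ++ [e], acc.2)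
            else if f e = maxF then (acc.1, acc.2 ++ [e])
            else acc) ([], []) :=
      idx_loop E f (fun acc v e =>
        if v = minF then (acc.1 ++ [e], acc.2)
        else if v = maxF then (acc.1, acc.2 ++ [e])
        else acc) ([], [])
    rw [hpr, pair_loop E f minF maxF hmm ([], [])]
    simp
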